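-- pv_equiv track=rewrite | github.com/tzlohn/StokeAnalysis | FuKuanAnalysis.py | dictPrice
-- ===== SOURCE A (Python) =====
-- def dictPrice(PriceList):
--     PriceDict = dict()
--     UsedPoint = list()
--     for APrice in PriceList:
--         for aPoint in APrice:
--             if aPoint[0] not in UsedPoint:
--                 PriceDict[aPoint[0]] = aPoint[1]
--                 UsedPoint.append(aPoint[0])
--
--     return PriceDict
-- ===== SOURCE B (Python) =====
-- def dictPrice(PriceList):
--     pts = [pt for APrice in PriceList for pt in APrice]
--     first = {k: v for k, v in reversed(pts)}
--     return {k: first[k] for k in dict.fromkeys(k for k, _ in pts)}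
-- ===== Notes on version B (the rewrite author's own statement) =====
-- stated objective: alternative
-- what changed: B drops the UsedPoint list and all membership/guard logic: it flattens the pairs, builds a value dict by unconditional overwrite over the reversed list (last write in reverse = first-seen value), and re-keys it through dict.fromkeys for first-occurrence order.
import Mathlib
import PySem

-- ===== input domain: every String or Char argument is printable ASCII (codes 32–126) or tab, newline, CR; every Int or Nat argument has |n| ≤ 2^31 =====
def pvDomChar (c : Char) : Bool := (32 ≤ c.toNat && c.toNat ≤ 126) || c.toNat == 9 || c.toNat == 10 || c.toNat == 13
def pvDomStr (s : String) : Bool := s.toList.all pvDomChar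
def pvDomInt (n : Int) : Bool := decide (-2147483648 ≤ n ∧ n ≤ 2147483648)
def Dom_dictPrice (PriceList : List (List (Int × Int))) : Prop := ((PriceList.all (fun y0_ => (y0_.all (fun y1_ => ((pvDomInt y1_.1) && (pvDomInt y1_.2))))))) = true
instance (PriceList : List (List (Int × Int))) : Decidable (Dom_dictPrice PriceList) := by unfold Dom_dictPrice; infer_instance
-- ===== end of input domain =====

-- B replaces A's guarded nested loops (UsedPoint membership check) by two comprehension passes:
-- a reversed overwrite pass yields each key's first-seen value, dict.fromkeys yields the
-- first-occurrence key order (objective: alternative).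

-- ===== PORT A =====
-- state: (PriceDict, UsedPoint); nested loops over PriceList / APrice, guarded insert + append
def dictPrice (PriceList : List (List (Int × Int))) : List (Int × Int) :=
  (PriceList.foldl
    (fun st APrice =>
      APrice.foldl
        (fun st aPoint =>
          if st.2.contains aPoint.1 then st
          else (st.1.insert aPoint.1 aPoint.2, st.2 ++ [aPoint.1]))
        st)
    ((PySem.Dict.empty : PySem.Dict Int Int), ([] : List Int))).1.items

-- ===== PORT B =====
-- pts = flattened list; first = {k: v for k, v in reversed(pts)} (overwrite insert over the
-- reversed list); result = {k: first[k] for k in dict.fromkeys(keys)} — dict.fromkeys is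
-- PySem.List.dedup; first[k] never raises (every k comes from pts), ported as get? + getD.
def dictPrice_alt (PriceList : List (List (Int × Int))) : List (Int × Int) :=
  let pts := PriceList.flatMap id
  let first := pts.reverse.foldl (fun d p => d.insert p.1 p.2) (PySem.Dict.empty : PySem.Dict Int Int)
  ((PySem.List.dedup (pts.map Prod.fst)).foldl
      (fun d k => d.insert k ((first.get? k).getD 0))
      (PySem.Dict.empty : PySem.Dict Int Int)).items

-- ===== PRECONDITION & SPEC =====
def Spec_dictPrice (PriceList : List (List (Int × Int))) (out : List (Int × Int)) : Prop := out = dictPrice_alt PriceList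
instance (PriceList : List (List (Int × Int))) (out : List (Int × Int)) : Decidable (Spec_dictPrice PriceList out) := by unfold Spec_dictPrice; infer_instance

-- ===== CLAIM (what is proved, stated in full; the proofs are below) =====
def Claim_equal_dictPrice : Prop := ∀ (PriceList : List (List (Int × Int))), Dom_dictPrice PriceList → Spec_dictPrice PriceList (dictPrice PriceList)

-- ===== LEMMAS AND PROOFS =====

-- first value bound to key k in the flat pair list l
def pvFirstVal (l : List (Int × Int)) (k : Int) : Option Int :=
  (l.find? (fun p => decide (p.1 = k))).map Prod.snd

-- A's loop with invariant used = keys collapses to a setdefault fold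
theorem dictPrice_loop_eq (l : List (Int × Int)) :
    ∀ (d : PySem.Dict Int Int) (used : List Int), used = d.keys →
    (l.foldl (fun st aPoint =>
        if st.2.contains aPoint.1 then st
        else (st.1.insert aPoint.1 aPoint.2, st.2 ++ [aPoint.1])) (d, used))
      = (l.foldl (fun d aPoint => d.setdefault aPoint.1 aPoint.2) d,
         (l.foldl (fun d aPoint => d.setdefault aPoint.1 aPoint.2) d).keys) := by
  induction l with
  | nil => intro d used h; simp [h]
  | cons p t ih =>
    intro d used h
    subst h
    simp only [List.foldl_cons]
    by_cases hc : d.contains p.1 = true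
    · have h1 : d.keys.contains p.1 = true := by
        rw [PySem.Dict.contains_eq_decide_mem_keys] at hc
        simpa [List.contains_eq_mem] using hc
      rw [h1]
      simp only [if_true]
      rw [PySem.Dict.setdefault_of_contains (h := hc)]
      exact ih d d.keys rfl
    · have hc' : d.contains p.1 = false := by simpa using hc
      have h1 : d.keys.contains p.1 = false := by
        rw [PySem.Dict.contains_eq_decide_mem_keys] at hc'
        simpa [List.contains_eq_mem] using hc'
      rw [h1]
      simp only [Bool.false_eq_true, if_false]
      rw [PySem.Dict.setdefault_of_not_contains (h := hc')]
      exact ih (d.insert p.1 p.2) (d.keys ++ [p.1])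
        (PySem.Dict.keys_insert_of_not_contains _ p.2 hc').symm

-- A's nested fold is the fold over the flattened list
theorem dictPrice_nested_eq_flat {σ : Type} (f : σ → (Int × Int) → σ)
    (L : List (List (Int × Int))) (s : σ) :
    L.foldl (fun st APrice => APrice.foldl f st) s = (L.flatMap id).foldl f s := by
  induction L generalizing s with
  | nil => rfl
  | cons h t ih => simp [List.flatMap_cons, List.foldl_append, ih]

-- lookup in the setdefault fold: d's binding wins, then the first occurrence in l
theorem get?_foldl_setdefault (l : List (Int × Int)) :
    ∀ (d : PySem.Dict Int Int) (k : Int),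
      (l.foldl (fun d p => d.setdefault p.1 p.2) d).get? k
        = ((d.get? k).or (pvFirstVal l k)) := by
  induction l with
  | nil => intro d k; simp [pvFirstVal]
  | cons p t ih =>
    intro d k
    simp only [List.foldl_cons]
    rw [ih]
    by_cases hk : k = p.1
    · subst hk
      rw [PySem.Dict.get?_setdefault_self]
      simp only [pvFirstVal, List.find?_cons, decide_true]
      cases h : d.get? p.1 <;> simp [Option.or]
    · rw [PySem.Dict.get?_setdefault_of_ne (hne := hk)]
      have : pvFirstVal (p :: t) k = pvFirstVal t k := by
        simp [pvFirstVal, Ne.symm hk]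
      rw [this]

-- lookup in the reversed overwrite fold: the first occurrence in l wins, then d
theorem get?_foldl_insert_reverse (l : List (Int × Int)) :
    ∀ (d : PySem.Dict Int Int) (k : Int),
      (l.reverse.foldl (fun d p => d.insert p.1 p.2) d).get? k
        = ((pvFirstVal l k).or (d.get? k)) := by
  induction l with
  | nil => intro d k; simp [pvFirstVal]
  | cons p t ih =>
    intro d k
    have : (p :: t).reverse.foldl (fun d p => d.insert p.1 p.2) d
        = ((t.reverse.foldl (fun d p => d.insert p.1 p.2) d).insert p.1 p.2) := by
      simp [List.foldl_append]
    rw [this]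
    by_cases hk : k = p.1
    · subst hk
      rw [PySem.Dict.get?_insert_self]
      simp [pvFirstVal]
    · rw [PySem.Dict.get?_insert_of_ne (hne := hk)]
      rw [ih]
      have : pvFirstVal (p :: t) k = pvFirstVal t k := by
        simp [pvFirstVal, Ne.symm hk]
      rw [this]

-- keys of the setdefault fold: ordered dedup of the key sequence
theorem keys_foldl_setdefault (l : List (Int × Int)) :
    ∀ (d : PySem.Dict Int Int),
      (l.foldl (fun d p => d.setdefault p.1 p.2) d).keys
        = PySem.Set.update d.keys (l.map Prod.fst) := by
  induction l with
  | nil => intro d; simp [PySem.Set.update]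
  | cons p t ih =>
    intro d
    simp only [List.foldl_cons, List.map_cons]
    rw [ih]
    by_cases hc : d.contains p.1 = true
    · rw [PySem.Dict.setdefault_of_contains (h := hc)]
      have hm : p.1 ∈ d.keys := (PySem.Dict.contains_iff_mem_keys d p.1).mp hc
      simp [PySem.Set.update, PySem.Set.add, hm]
    · have hc' : d.contains p.1 = false := by simpa using hc
      rw [PySem.Dict.setdefault_of_not_contains (h := hc')]
      rw [PySem.Dict.keys_insert_of_not_contains (h := hc')]
      have hm : p.1 ∉ d.keys := fun h => by
        simp [(PySem.Dict.contains_iff_mem_keys d p.1).mpr h] at hc'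
      simp [PySem.Set.update, PySem.Set.add, hm]

-- ===== VERDICT (by name: the statement is the Claim_ definition above) =====
theorem dictPrice_spec : Claim_equal_dictPrice := by
  intro PriceList _
  unfold Spec_dictPrice dictPrice dictPrice_alt
  rw [dictPrice_nested_eq_flat, dictPrice_loop_eq _ _ _ (by simp [PySem.Dict.keys, PySem.Dict.empty])]
  simp only []
  set pts := PriceList.flatMap id with hpts
  set D := pts.foldl (fun d p => d.setdefault p.1 p.2) (PySem.Dict.empty : PySem.Dict Int Int) with hD
  set first := pts.reverse.foldl (fun d p => d.insert p.1 p.2) (PySem.Dict.empty : PySem.Dict Int Int) with hfirst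
  have hkeys : D.keys = PySem.List.dedup (pts.map Prod.fst) := by
    rw [hD, keys_foldl_setdefault]
    simp [PySem.Dict.keys, PySem.Dict.empty, PySem.Set.update, PySem.List.dedup_eq_ofList, PySem.Set.ofList]
  have hnd : D.keys.Nodup := by rw [hkeys]; exact PySem.List.nodup_dedup _
  have hget : ∀ k, D.get? k = first.get? k := by
    intro k
    rw [hD, hfirst, get?_foldl_setdefault, get?_foldl_insert_reverse]
    simp [PySem.Dict.get?_empty]
  -- left side: items of D as a map over its keys
  rw [PySem.Dict.items_eq_map_keys D hnd 0]
  -- right side: fresh distinct keys appended to empty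
  have h5 : (List.foldl (fun d k => d.insert k ((first.get? k).getD 0))
        (PySem.Dict.empty : PySem.Dict Int Int) (PySem.List.dedup (pts.map Prod.fst))).items
      = (PySem.List.dedup (pts.map Prod.fst)).map (fun k => (k, (first.get? k).getD 0)) := by
    have := PySem.Dict.items_foldl_insert_fresh
      (l := PySem.List.dedup (pts.map Prod.fst)) (k := fun x => x)
      (v := fun k => (first.get? k).getD 0)
      (d := (PySem.Dict.empty : PySem.Dict Int Int))
      (by intro a _; simp) (by simp)
    simpa using this
  rw [h5, hkeys]
  exact List.map_congr_left (fun k _ => by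
    rw [PySem.Dict.getD_eq_get?_getD, hget k])
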